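-- pv_equiv track=rewrite | github.com/lorenzovngl/meta-hacker-cup | 2020/qualification_round/running_on_fumes_chapter_1/running_on_fumes_chapter_1.py | solve
-- ===== SOURCE A (Python) =====
-- def solve(N, M, C):
--     # F_i: the minimum cost required to be at city i with a full tank of gas
--     # G_i: the minimum cost required to arrive at city i at all (+inf if unachievable)
--     L = [{'i': 0, 'F': 0}]
--     for i in range(0, N):
--         while len(L) > 0 and L[0]['i'] < i - M:
--             L.pop(0)
--         if len(L) == 0:
--             return -1
--         if C[i]:
--             d = L[0]['F'] + C[i]
--             while len(L) > 0 and d <= L[-1]['F']: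
--                 L.pop(-1)
--             L.append({'i': i, 'F': d})
--     return L[0]['F']
-- ===== SOURCE B (Python) =====
-- def solve(N, M, C):
--     # Append-only history of refuel candidates; feasibility checked against the
--     # newest candidate only, running `best` carries the answer out of the loop.
--     cand = [(0, 0)]
--     best = 0
--     for i in range(N):
--         if cand[-1][0] < i - M:
--             return -1
--         best = min(f for p, f in cand if p >= i - M)
--         if C[i]:
--             cand.append((i, best + C[i]))
--             best = min(best, best + C[i])
--     return best
-- ===== Notes on version B (the rewrite author's own statement) =====
-- stated objective: simpler
-- what changed: Replaces the monotonic deque (front expiry pops, back domination pops, answer read off the front) with an append-only history of candidates: feasibility is decided by comparing only the newest candidate's index to the window bound, the window minimum is a fresh linear scan each step, and the answer is a running `best` accumulator returned after the loop.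
-- outside the precondition, e.g. on solve(3, 1, [0, 0]): A returns -1, B returns -1
import Mathlib
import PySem

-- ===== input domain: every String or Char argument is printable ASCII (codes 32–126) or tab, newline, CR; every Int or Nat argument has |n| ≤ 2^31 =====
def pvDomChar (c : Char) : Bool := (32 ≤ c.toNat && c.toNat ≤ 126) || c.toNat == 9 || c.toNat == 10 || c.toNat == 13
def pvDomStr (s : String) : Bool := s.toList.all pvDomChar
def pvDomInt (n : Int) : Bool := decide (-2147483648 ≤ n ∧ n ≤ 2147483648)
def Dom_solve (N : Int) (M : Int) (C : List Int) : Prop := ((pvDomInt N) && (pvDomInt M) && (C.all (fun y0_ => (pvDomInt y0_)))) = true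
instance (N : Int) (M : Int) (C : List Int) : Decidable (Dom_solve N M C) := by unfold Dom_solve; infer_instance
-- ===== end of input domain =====

-- B drops A's deque pops for an append-only candidate history with a running best (simpler, not faster).

-- ===== PORT A =====
-- `while len(L) > 0 and L[0]['i'] < i - M: L.pop(0)`
def dropFrontA (bound : Int) : List (Int × Int) → List (Int × Int)
  | [] => []
  | p :: rest => if p.1 < bound then dropFrontA bound rest else p :: rest

-- `while len(L) > 0 and d <= L[-1]['F']: L.pop(-1)`  (pop from the back = dropWhile on the reverse)
def popBackA (d : Int) (l : List (Int × Int)) : List (Int × Int) :=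
  (l.reverse.dropWhile (fun p => decide (d ≤ p.2))).reverse

def solveA_go (M : Int) (C : List Int) : Nat → Nat → List (Int × Int) → Int
  | _, 0, L => (L.headD (0, 0)).2            -- final `return L[0]['F']` (L never empty here under Pre_)
  | i, n+1, L =>
    let L1 := dropFrontA ((i : Int) - M) L
    if L1.isEmpty then -1
    else
      match PySem.List.pyGet? C (i : Int) with
      | none => 0                             -- Python raises IndexError here; excluded by Pre_solve
      | some c =>
        if c ≠ 0 then
          let d := (L1.headD (0, 0)).2 + c
          solveA_go M C (i + 1) n (popBackA d L1 ++ [((i : Int), d)])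
        else solveA_go M C (i + 1) n L1

def solve (N : Int) (M : Int) (C : List Int) : Int :=
  solveA_go M C 0 N.toNat [(0, 0)]

-- ===== PORT B =====
-- `cand[-1]` (cand is never empty in B)
def lastP : List (Int × Int) → (Int × Int)
  | [] => (0, 0)
  | [p] => p
  | _ :: q :: t => lastP (q :: t)

-- `min(f for p, f in cand if ...)` applied to the already-filtered list (nonempty where evaluated)
def minFB : List (Int × Int) → Int
  | [] => 0
  | p :: rest => rest.foldl (fun a q => min a q.2) p.2

def solveB_go (M : Int) (C : List Int) : Nat → Nat → List (Int × Int) → Int → Int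
  | _, 0, _, best => best
  | i, n+1, cand, best =>
    if (lastP cand).1 < (i : Int) - M then -1
    else
      let b := minFB (cand.filter (fun p => decide ((i : Int) - M ≤ p.1)))
      match PySem.List.pyGet? C (i : Int) with
      | none => best - best                   -- Python raises IndexError here; excluded by Pre_solve
      | some c =>
        if c ≠ 0 then solveB_go M C (i + 1) n (cand ++ [((i : Int), b + c)]) (min b (b + c))
        else solveB_go M C (i + 1) n cand b

def solve_alt (N : Int) (M : Int) (C : List Int) : Int :=
  solveB_go M C 0 N.toNat [(0, 0)] 0

-- ===== PRECONDITION & SPEC =====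
-- Pre_ excludes N > len(C) with M ≥ 0: there Python A reads C out of range and raises
-- IndexError, except when the candidate window empties first and it returns -1 early —
-- a case B reproduces anyway (M < 0, where the window always empties at i = 0, is admitted).
def Pre_solve (N : Int) (M : Int) (C : List Int) : Prop := N ≤ (C.length : Int) ∨ M < 0
instance (N : Int) (M : Int) (C : List Int) : Decidable (Pre_solve N M C) := by unfold Pre_solve; infer_instance
def pvWitness_solve : Int × Int × List Int := (3, 2, [0, 1, 0])

def Spec_solve (N : Int) (M : Int) (C : List Int) (out : Int) : Prop := out = solve_alt N M C
instance (N : Int) (M : Int) (C : List Int) (out : Int) : Decidable (Spec_solve N M C out) := by unfold Spec_solve; infer_instance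

-- ===== CLAIM (what is proved, stated in full; the proofs are below) =====
def Claim_equal_solve : Prop := ∀ (N : Int) (M : Int) (C : List Int), Dom_solve N M C → Pre_solve N M C → Spec_solve N M C (solve N M C)

-- ===== LEMMAS AND PROOFS =====

-- A's deque entries dominate: nondecreasing indices, strictly increasing costs.
def R2 (p q : Int × Int) : Prop := p.1 ≤ q.1 ∧ p.2 < q.2

-- Invariant tying A's pruned deque L to B's full history `cand` and accumulator `best` at step i.
def InvAB (i M : Int) (L cand : List (Int × Int)) (best : Int) : Prop :=
  L ≠ [] ∧ L.Sublist cand ∧ L.Pairwise R2 ∧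
  lastP L = lastP cand ∧
  (∀ p ∈ cand, i - M ≤ p.1 → ∃ q ∈ L, p.1 ≤ q.1 ∧ q.2 ≤ p.2) ∧
  (∀ p ∈ cand, p.1 ≤ i) ∧
  best = (L.headD (0, 0)).2

lemma dropWhile_eq_filter_not {α : Type} (q : α → Bool) (R : α → α → Prop)
    (h : ∀ a b, R a b → q a = false → q b = false) :
    ∀ l : List α, l.Pairwise R → l.dropWhile q = l.filter (fun a => !q a) := by
  intro l hl
  induction l with
  | nil => rfl
  | cons a t ih =>
    rcases List.pairwise_cons.mp hl with ⟨ha, ht⟩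
    by_cases hq : q a = true
    · simp [List.dropWhile, List.filter, hq, ih ht]
    · have hq' : q a = false := by simpa using hq
      have : t.filter (fun a => !q a) = t := by
        apply List.filter_eq_self.mpr
        intro b hb
        simp [h a b (ha b hb) hq']
      simp [List.dropWhile, List.filter, hq', this]

lemma dropFrontA_eq_dropWhile (bound : Int) :
    ∀ l : List (Int × Int), dropFrontA bound l = l.dropWhile (fun p => decide (p.1 < bound)) := by
  intro l
  induction l with
  | nil => rfl
  | cons p t ih =>
    by_cases h : p.1 < bound
    · simp [dropFrontA, List.dropWhile, h, ih]
    · simp [dropFrontA, List.dropWhile, h]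

lemma dropFrontA_eq_filter (bound : Int) (l : List (Int × Int)) (hl : l.Pairwise R2) :
    dropFrontA bound l = l.filter (fun p => decide (bound ≤ p.1)) := by
  rw [dropFrontA_eq_dropWhile,
      dropWhile_eq_filter_not (fun p => decide (p.1 < bound)) R2 ?mono l hl]
  · apply List.filter_congr
    intro p _
    by_cases h : p.1 < bound <;> simp [h] <;> omega
  · intro a b hab ha
    simp only [decide_eq_false_iff_not, not_lt] at ha ⊢
    exact le_trans ha hab.1

lemma popBackA_eq_filter (d : Int) (l : List (Int × Int)) (hl : l.Pairwise R2) :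
    popBackA d l = l.filter (fun p => decide (p.2 < d)) := by
  unfold popBackA
  have hrev : l.reverse.Pairwise (fun a b => R2 b a) := by
    simpa [List.pairwise_reverse] using hl
  rw [dropWhile_eq_filter_not (fun p => decide (d ≤ p.2)) (fun a b => R2 b a) ?mono l.reverse hrev]
  · rw [← List.filter_reverse, List.reverse_reverse]
    apply List.filter_congr
    intro p _
    by_cases h : d ≤ p.2 <;> simp [h] <;> omega
  · intro a b hab ha
    simp only [decide_eq_false_iff_not, not_le] at ha ⊢
    exact lt_trans hab.2 ha

lemma foldl_min_aux (l : List (Int × Int)) :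
    ∀ a : Int, l.foldl (fun a q => min a q.2) a ≤ a ∧
      (∀ q ∈ l, l.foldl (fun a q => min a q.2) a ≤ q.2) ∧
      (l.foldl (fun a q => min a q.2) a = a ∨ ∃ q ∈ l, l.foldl (fun a q => min a q.2) a = q.2) := by
  induction l with
  | nil => intro a; simp
  | cons p t ih =>
    intro a
    obtain ⟨h1, h2, h3⟩ := ih (min a p.2)
    refine ⟨?_, ?_, ?_⟩
    · rw [List.foldl_cons]; exact le_trans h1 (min_le_left _ _)
    · intro q hq
      rw [List.foldl_cons]
      rcases List.mem_cons.mp hq with rfl | h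
      · exact le_trans h1 (min_le_right _ _)
      · exact h2 q h
    · rcases h3 with h | ⟨q, hq, h⟩
      · rcases min_cases a p.2 with ⟨he, _⟩ | ⟨he, _⟩
        · exact Or.inl (by rw [List.foldl_cons, h, he])
        · exact Or.inr ⟨p, List.mem_cons_self, by rw [List.foldl_cons, h, he]⟩
      · exact Or.inr ⟨q, List.mem_cons_of_mem _ hq, by rw [List.foldl_cons]; exact h⟩

lemma minFB_le (l : List (Int × Int)) (q : Int × Int) (hq : q ∈ l) : minFB l ≤ q.2 := by
  cases l with
  | nil => cases hq
  | cons p t =>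
    obtain ⟨h1, h2, _⟩ := foldl_min_aux t p.2
    rcases List.mem_cons.mp hq with h | h
    · exact h ▸ h1
    · exact h2 q h

lemma minFB_attained (l : List (Int × Int)) (h : l ≠ []) : ∃ q ∈ l, minFB l = q.2 := by
  cases l with
  | nil => exact absurd rfl h
  | cons p t =>
    obtain ⟨_, _, h3⟩ := foldl_min_aux t p.2
    rcases h3 with h | ⟨q, hq, hEq⟩
    · exact ⟨p, List.mem_cons_self, h⟩
    · exact ⟨q, List.mem_cons_of_mem _ hq, hEq⟩

-- A's deque front cost equals the min over the in-window candidates.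
lemma head_eq_minFB (p : Int × Int) (t S : List (Int × Int))
    (hsub : (p :: t).Sublist S) (hpw : (p :: t).Pairwise R2)
    (hdom : ∀ r ∈ S, ∃ q ∈ p :: t, r.1 ≤ q.1 ∧ q.2 ≤ r.2) :
    minFB S = p.2 := by
  have hpS : p ∈ S := hsub.mem List.mem_cons_self
  have hub : minFB S ≤ p.2 := minFB_le S p hpS
  have hne : S ≠ [] := by intro h; rw [h] at hpS; cases hpS
  obtain ⟨r, hr, hre⟩ := minFB_attained S hne
  obtain ⟨q, hq, _, hq2⟩ := hdom r hr
  have hpq : p.2 ≤ q.2 := by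
    rcases List.mem_cons.mp hq with h | h
    · rw [h]
    · exact le_of_lt ((List.pairwise_cons.mp hpw).1 q h).2
  omega

lemma lastP_mem : ∀ (l : List (Int × Int)), l ≠ [] → lastP l ∈ l := by
  intro l
  induction l with
  | nil => intro h; exact absurd rfl h
  | cons p t ih =>
    intro _
    cases t with
    | nil => simp [lastP]
    | cons q r => exact List.mem_cons_of_mem _ (ih (by simp))

lemma lastP_max (l : List (Int × Int)) (hl : l.Pairwise R2) (p : Int × Int) (hp : p ∈ l) :
    p.1 ≤ (lastP l).1 := by
  induction l with
  | nil => cases hp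
  | cons a t ih =>
    rcases List.pairwise_cons.mp hl with ⟨ha, ht⟩
    cases t with
    | nil =>
      rcases List.mem_singleton.mp hp with rfl
      simp [lastP]
    | cons q r =>
      have hlast : lastP (a :: q :: r) = lastP (q :: r) := rfl
      rcases List.mem_cons.mp hp with rfl | h
      · have hmem : lastP (q :: r) ∈ q :: r := lastP_mem _ (by simp)
        rw [hlast]
        exact (ha _ hmem).1
      · rw [hlast]; exact ih ht h

lemma lastP_append_single (l : List (Int × Int)) (x : Int × Int) : lastP (l ++ [x]) = x := by
  induction l with
  | nil => rfl
  | cons a t ih =>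
    cases t with
    | nil => rfl
    | cons q r => simpa using ih

lemma lastP_dropFrontA (bound : Int) :
    ∀ l : List (Int × Int), dropFrontA bound l ≠ [] → lastP (dropFrontA bound l) = lastP l := by
  intro l
  induction l with
  | nil => intro h; exact absurd rfl h
  | cons p t ih =>
    intro hne
    by_cases hp : p.1 < bound
    · have hd : dropFrontA bound (p :: t) = dropFrontA bound t := by simp [dropFrontA, hp]
      rw [hd] at hne ⊢
      have htne : t ≠ [] := by
        intro h; rw [h] at hne; exact hne rfl
      rcases t with _ | ⟨q, r⟩
      · exact absurd rfl htne
      · rw [ih hne]; rfl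
    · simp [dropFrontA, hp]

-- With a nonempty pruned deque, A's and B's loop bodies stay in lockstep.
lemma main_loop (M : Int) (C : List Int) :
    ∀ (n i : Nat) (L cand : List (Int × Int)) (best : Int), InvAB (i : Int) M L cand best →
      solveA_go M C i n L = solveB_go M C i n cand best := by
  intro n
  induction n with
  | zero =>
    intro i L cand best h
    exact h.2.2.2.2.2.2.symm
  | succ n ih =>
    intro i L cand best h
    obtain ⟨hLne, hsub, hpw, hlast, hdom, hbnd, hbest⟩ := h
    have hL1 : dropFrontA ((i : Int) - M) L = L.filter (fun p => decide ((i : Int) - M ≤ p.1)) :=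
      dropFrontA_eq_filter _ _ hpw
    -- empty pruned deque ⟺ B's last-candidate test
    have hiff : (L.filter (fun p => decide ((i : Int) - M ≤ p.1)) = [])
        ↔ ((lastP cand).1 < (i : Int) - M) := by
      rw [← hlast]
      constructor
      · intro he
        by_contra hge
        push_neg at hge
        have hmem : lastP L ∈ L.filter (fun p => decide ((i : Int) - M ≤ p.1)) :=
          List.mem_filter.mpr ⟨lastP_mem _ hLne, by simpa using hge⟩
        rw [he] at hmem; cases hmem
      · intro hlt
        apply List.filter_eq_nil_iff.mpr
        intro p hp
        have := lastP_max L hpw p hp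
        simp only [decide_eq_true_eq]
        omega
    show (if (dropFrontA ((i : Int) - M) L).isEmpty then -1 else _)
        = (if (lastP cand).1 < (i : Int) - M then -1 else _)
    rw [hL1]
    by_cases hLe : L.filter (fun p => decide ((i : Int) - M ≤ p.1)) = []
    · rw [if_pos (by simpa using hLe), if_pos (hiff.mp hLe)]
    · rw [if_neg (by simpa using hLe), if_neg (fun hb => hLe (hiff.mpr hb))]
      rcases hget : PySem.List.pyGet? C (i : Int) with _ | c
      · simp
      · rcases hL1c : L.filter (fun p => decide ((i : Int) - M ≤ p.1)) with _ | ⟨p, t⟩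
        · exact absurd hL1c hLe
        · rw [hL1c]
          have hsub1 : (p :: t).Sublist (cand.filter (fun p => decide ((i : Int) - M ≤ p.1))) :=
            hL1c ▸ hsub.filter _
          have hpw1 : (p :: t).Pairwise R2 := hL1c ▸ hpw.filter _
          have hmemL1 : ∀ q ∈ p :: t, q ∈ L ∧ (i : Int) - M ≤ q.1 := by
            intro q hq
            have : q ∈ L.filter (fun p => decide ((i : Int) - M ≤ p.1)) := hL1c ▸ hq
            rw [List.mem_filter] at this
            exact ⟨this.1, by simpa using this.2⟩
          have hdom1 : ∀ r ∈ cand.filter (fun p => decide ((i : Int) - M ≤ p.1)),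
              ∃ q ∈ p :: t, r.1 ≤ q.1 ∧ q.2 ≤ r.2 := by
            intro r hr
            rw [List.mem_filter] at hr
            obtain ⟨hrc, hrw⟩ := hr
            simp only [decide_eq_true_eq] at hrw
            obtain ⟨q, hq, hq1, hq2⟩ := hdom r hrc hrw
            refine ⟨q, hL1c ▸ List.mem_filter.mpr ⟨hq, by simp only [decide_eq_true_eq]; omega⟩, hq1, hq2⟩
          have hmin : minFB (cand.filter (fun p => decide ((i : Int) - M ≤ p.1))) = p.2 :=
            head_eq_minFB p t _ hsub1 hpw1 hdom1
          have hcast : ((i + 1 : Nat) : Int) = (i : Int) + 1 := by push_cast; ring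
          by_cases hc : c ≠ 0
          · -- refuel branch: A pops the back and appends; B just appends to the history
            have hpop : popBackA (p.2 + c) (p :: t)
                = (p :: t).filter (fun q => decide (q.2 < p.2 + c)) :=
              popBackA_eq_filter _ _ hpw1
            have hmins : ∀ q ∈ t, p.2 ≤ q.2 := by
              intro q hq
              exact le_of_lt ((List.pairwise_cons.mp hpw1).1 q hq).2
            have key : solveA_go M C (i+1) n
                  (popBackA (((p :: t).headD (0,0)).2 + c) (p :: t)
                    ++ [((i : Int), ((p :: t).headD (0,0)).2 + c)])
                = solveB_go M C (i+1) n
                    (cand ++ [((i : Int), minFB (cand.filter (fun p => decide ((i : Int) - M ≤ p.1))) + c)])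
                    (min (minFB (cand.filter (fun p => decide ((i : Int) - M ≤ p.1))))
                         (minFB (cand.filter (fun p => decide ((i : Int) - M ≤ p.1))) + c)) := by
              simp only [List.headD_cons, hmin, hpop]
              apply ih
              refine ⟨by simp, ?_, ?_, ?_, ?_, ?_, ?_⟩
              · refine List.Sublist.append ?_ (List.Sublist.refl _)
                exact ((p :: t).filter_sublist.trans (hL1c ▸ L.filter_sublist : (p :: t).Sublist L)).trans hsub
              · rw [List.pairwise_append]
                refine ⟨hpw1.filter _, List.pairwise_singleton _ _, ?_⟩
                intro q hq r hr
                rw [List.mem_filter] at hq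
                rw [List.mem_singleton] at hr
                subst hr
                have hq2 : q.2 < p.2 + c := by simpa using hq.2
                have hqL : q ∈ L := (hmemL1 q hq.1).1
                exact ⟨hbnd q (hsub.mem hqL), hq2⟩
              · rw [lastP_append_single, lastP_append_single]
              · intro r hr hrw
                rw [hcast] at hrw
                rcases List.mem_append.mp hr with hr | hr
                · obtain ⟨q, hq, hq1, hq2⟩ := hdom r hr (by omega)
                  have hqL1 : q ∈ p :: t :=
                    hL1c ▸ List.mem_filter.mpr ⟨hq, by simp only [decide_eq_true_eq]; omega⟩
                  by_cases hqd : q.2 < p.2 + c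
                  · exact ⟨q, List.mem_append.mpr (Or.inl (List.mem_filter.mpr ⟨hqL1, by simpa⟩)), hq1, hq2⟩
                  · refine ⟨((i : Int), p.2 + c), List.mem_append.mpr (Or.inr List.mem_cons_self),
                      hbnd r hr, ?_⟩
                    simp only [not_lt] at hqd
                    exact le_trans hqd hq2
                · rw [List.mem_singleton] at hr
                  subst hr
                  exact ⟨((i : Int), p.2 + c), List.mem_append.mpr (Or.inr List.mem_cons_self),
                    le_refl _, le_refl _⟩
              · intro r hr
                rw [hcast]
                rcases List.mem_append.mp hr with hr | hr
                · exact le_trans (hbnd r hr) (by omega)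
                · rw [List.mem_singleton] at hr; subst hr; simp
              · -- the accumulator equals the head of A's new deque
                by_cases hcp : 0 < c
                · have hkeep : (fun q => decide (q.2 < p.2 + c)) p = true := by
                    simp only [decide_eq_true_eq]; omega
                  rw [List.filter_cons, if_pos hkeep]
                  simp only [List.cons_append, List.headD_cons]
                  omega
                · have hcn : c < 0 := by omega
                  have hnil : (p :: t).filter (fun q => decide (q.2 < p.2 + c)) = [] := by
                    apply List.filter_eq_nil_iff.mpr
                    intro q hq
                    simp only [decide_eq_true_eq, not_lt]
                    rcases List.mem_cons.mp hq with rfl | hqt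
                    · omega
                    · have := hmins q hqt; omega
                  rw [hnil]
                  simp only [List.nil_append, List.headD_cons]
                  omega
            simpa only [if_pos hc, List.headD_cons] using key
          · -- no refuel: A keeps the pruned deque, B keeps the full history and sets best
            have key : solveA_go M C (i+1) n (p :: t)
                = solveB_go M C (i+1) n cand
                    (minFB (cand.filter (fun p => decide ((i : Int) - M ≤ p.1)))) := by
              apply ih
              refine ⟨by simp, ?_, hpw1, ?_, ?_, ?_, ?_⟩
              · exact (hL1c ▸ L.filter_sublist : (p :: t).Sublist L).trans hsub
              · rw [← hlast, ← hL1c, ← hL1]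
                exact lastP_dropFrontA _ _ (by rw [hL1, hL1c]; simp)
              · intro r hr hrw
                rw [hcast] at hrw
                obtain ⟨q, hq, hq1, hq2⟩ := hdom r hr (by omega)
                exact ⟨q, hL1c ▸ List.mem_filter.mpr ⟨hq, by simp only [decide_eq_true_eq]; omega⟩, hq1, hq2⟩
              · intro r hr
                rw [hcast]
                exact le_trans (hbnd r hr) (by omega)
              · rw [hmin]; rfl
            simpa only [if_neg hc] using key

-- ===== VERDICT (by name: the statement is the Claim_ definition above) =====
theorem solve_spec : Claim_equal_solve := by
  intro N M C _ _
  unfold Spec_solve solve solve_alt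
  apply main_loop
  refine ⟨by simp, List.Sublist.refl _, List.pairwise_singleton _ _, rfl, ?_, ?_, rfl⟩
  · intro p hp _
    rw [List.mem_singleton] at hp
    exact ⟨(0, 0), List.mem_singleton.mpr rfl, by simp [hp], by simp [hp]⟩
  · intro p hp
    rw [List.mem_singleton] at hp
    simp [hp]
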